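-- pv_equiv track=rewrite | github.com/sagemath/sagetrac-mirror | src/sage/modular/multiple_zeta.py | coproduct_iterator
-- ===== SOURCE A (Python) =====
-- def coproduct_iterator(paire):
--     """
--     Return an iterator for terms in the coproduct.
--
--     This is an auxiliary function.
--
--     INPUT:
--
--     - ``paire`` -- a pair (list of indices, end of word)
--
--     OUTPUT:
--
--     iterator for terms in the motivic coproduct
--
--     Each term is seen as a list of positions.
--
--     EXAMPLES::
--
--         sage: from sage.modular.multiple_zeta import coproduct_iterator
--         sage: list(coproduct_iterator(([0],[0,1,0,1])))
--         [[0, 1, 2, 3], [0, 3]]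
--         sage: list(coproduct_iterator(([0],[0,1,0,1,1,0,1])))
--         [[0, 1, 2, 3, 4, 5, 6],
--          [0, 1, 2, 6],
--          [0, 1, 5, 6],
--          [0, 3, 4, 5, 6],
--          [0, 4, 5, 6],
--          [0, 6]]
--     """
--     head, tail = paire
--     n = len(tail)
--     if n == 1:
--         yield head
--         return
--     start_value = tail[0]
--     last_index = head[-1]
--     yield from coproduct_iterator((head + [last_index + 1], tail[1:]))
--     for step in range(3, n):
--         if tail[step] != start_value:
--             yield from coproduct_iterator((head + [last_index + step],
--                                            tail[step:]))
-- ===== SOURCE B (Python) =====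
-- # Different decomposition: compute the relative cut-position patterns of the tail once,
-- # then translate each pattern by the head's last index and prepend the head.
-- def _rel(tail):
--     n = len(tail)
--     if n == 1:
--         return [[]]
--     start_value = tail[0]
--     steps = [1] + [s for s in range(3, n) if tail[s] != start_value]
--     return [[step] + [step + x for x in r]
--             for step in steps
--             for r in _rel(tail[step:])]
--
-- def coproduct_iterator(paire):
--     head, tail = paire
--     if len(tail) == 1:
--         yield head
--         return
--     last_index = head[-1]
--     for r in _rel(tail):
--         yield head + [last_index + x for x in r]
-- ===== Notes on version B (the rewrite author's own statement) =====
-- stated objective: alternative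
-- what changed: B factors the computation: a helper computes the tail's relative cut patterns once by recursion on the tail alone, and the top level translates each pattern by the head's last index and prepends the head, instead of A's single recursive generator that threads the growing absolute-position head through every recursive call.
import Mathlib
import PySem

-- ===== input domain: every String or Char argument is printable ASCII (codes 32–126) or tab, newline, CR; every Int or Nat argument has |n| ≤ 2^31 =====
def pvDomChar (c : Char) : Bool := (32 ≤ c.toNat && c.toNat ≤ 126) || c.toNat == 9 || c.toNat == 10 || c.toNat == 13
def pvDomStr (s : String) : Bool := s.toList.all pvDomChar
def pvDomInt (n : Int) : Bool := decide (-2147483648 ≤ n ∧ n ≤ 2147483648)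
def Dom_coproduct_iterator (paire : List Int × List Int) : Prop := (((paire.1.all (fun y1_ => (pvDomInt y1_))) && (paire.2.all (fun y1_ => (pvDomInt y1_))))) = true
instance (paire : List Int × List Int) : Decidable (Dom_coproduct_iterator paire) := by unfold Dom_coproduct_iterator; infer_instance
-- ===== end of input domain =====

-- B uses a different decomposition: it computes the relative cut patterns of the tail once (_rel),
-- then translates each pattern by the head's last index and prepends the head — same output list,
-- whereas A threads the growing absolute-position head through one recursive generator.

-- ===== PORT A =====
-- literal transliteration of A, the recursive generator materialised as the list of yielded terms:
-- `start_value = tail[0]` is read off the cons pattern (tail[0] on an empty tail raises IndexError: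
-- the `[] , _` fallthrough, excluded by Pre_), head[-1] is pyGet? head (-1) (none = IndexError,
-- excluded by Pre_); `for step in range(3, n)` is the foldl over `pyRange 3 n` (attached for
-- termination); `tail[step]` is pyGetD, exact since every step of the loop is in range.
def coproduct_iterator (paire : List Int × List Int) : List (List Int) :=
  match paire with
  | (head, tail) =>
    if tail.length = 1 then [head]
    else
      match tail, PySem.List.pyGet? head (-1) with
      | t0 :: rest, some last_index =>
          coproduct_iterator (head ++ [last_index + 1], PySem.List.slice (t0 :: rest) (some 1)) ++
          (PySem.List.pyRange 3 (PySem.List.len (t0 :: rest))).attach.foldl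
            (fun acc st =>
              if PySem.List.pyGetD (t0 :: rest) st.1 0 ≠ t0 then
                acc ++ coproduct_iterator
                  (head ++ [last_index + st.1], PySem.List.slice (t0 :: rest) (some st.1))
              else acc) []
      | _, _ => []  -- tail[0] or head[-1] raises IndexError (excluded by Pre_)
termination_by paire.2.length
decreasing_by
  · simp [PySem.List.slice_from_one]
  · have hmem := st.2
    rw [PySem.List.mem_pyRange_one] at hmem
    simp only [PySem.List.len_eq] at hmem
    rw [PySem.List.slice_from _ (a := st.1) (by omega)]
    simp only [List.length_drop]
    simp only [List.length_cons] at hmem ⊢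
    omega

-- ===== PORT B =====
-- B's helper _rel: the relative cut patterns of the tail (the comprehension is flatMap/map;
-- tail[0] on an empty tail raises IndexError — the `[]` branch, excluded by Pre_).
def pvRel (tail : List Int) : List (List Int) :=
  if tail.length = 1 then [[]]
  else
    match tail with
    | t0 :: rest =>
        ((1 : Int) :: (PySem.List.pyRange 3 (PySem.List.len (t0 :: rest))).filter
            (fun s => PySem.List.pyGetD (t0 :: rest) s 0 ≠ t0)).attach.flatMap
          (fun st =>
            (pvRel (PySem.List.slice (t0 :: rest) (some st.1))).map
              (fun r => st.1 :: r.map (fun x => st.1 + x)))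
    | [] => []
termination_by tail.length
decreasing_by
  have hmem := st.2
  have h1 : (1 : Int) ≤ st.1 := by
    rcases List.mem_cons.mp hmem with h | h
    · omega
    · have := PySem.List.mem_pyRange_one.mp (List.mem_of_mem_filter h)
      omega
  rw [PySem.List.slice_from _ (a := st.1) (by omega)]
  simp only [List.length_drop, List.length_cons]
  omega

def coproduct_iterator_alt (paire : List Int × List Int) : List (List Int) :=
  match paire with
  | (head, tail) =>
    if tail.length = 1 then [head]
    else
      match PySem.List.pyGet? head (-1) with
      | some last_index =>
          (pvRel tail).map (fun r => head ++ r.map (fun x => last_index + x))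
      | none => []  -- head[-1] raises IndexError (excluded by Pre_)

-- ===== PRECONDITION & SPEC =====
-- Pre_ excludes exactly the inputs on which BOTH programs raise IndexError:
-- an empty tail (tail[0]) or an empty head together with len(tail) != 1 (head[-1]).
def Pre_coproduct_iterator (paire : List Int × List Int) : Prop :=
  paire.2 ≠ [] ∧ (paire.2.length = 1 ∨ paire.1 ≠ [])
instance (paire : List Int × List Int) : Decidable (Pre_coproduct_iterator paire) := by unfold Pre_coproduct_iterator; infer_instance

def pvWitness_coproduct_iterator : (List Int × List Int) := ([0], [0, 1, 0, 1])

def Spec_coproduct_iterator (paire : List Int × List Int) (out : List (List Int)) : Prop := out = coproduct_iterator_alt paire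
instance (paire : List Int × List Int) (out : List (List Int)) : Decidable (Spec_coproduct_iterator paire out) := by unfold Spec_coproduct_iterator; infer_instance

-- ===== CLAIM (what is proved, stated in full; the proofs are below) =====
def Claim_equal_coproduct_iterator : Prop := ∀ (paire : List Int × List Int), Dom_coproduct_iterator paire → Pre_coproduct_iterator paire → Spec_coproduct_iterator paire (coproduct_iterator paire)

-- ===== LEMMAS AND PROOFS =====

-- A's accumulating loop `if tail[step] != sv: acc ++ …` is the flatMap over the filtered range.
lemma pv_foldl_if_append {α β : Type} (p : α → Prop) [DecidablePred p] (g : α → List β)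
    (l : List α) (init : List β) :
    l.foldl (fun acc x => if p x then acc ++ g x else acc) init
      = init ++ (l.filter (fun x => decide (p x))).flatMap g := by
  induction l generalizing init with
  | nil => simp
  | cons a l ih => by_cases h : p a <;> simp [h, ih]

lemma pv_flatMap_attach {α β : Type} (l : List α) (F : α → List β) :
    l.attach.flatMap (fun st => F st.1) = l.flatMap F := by
  conv_rhs => rw [← List.attach_map_subtype_val l]
  rw [List.flatMap_map]

-- the heart of the equivalence: A's generator equals head-translation of B's relative patterns
lemma pv_main : ∀ (n : Nat) (tail : List Int), tail.length = n → tail ≠ [] →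
    ∀ (head : List Int) (last : Int), head.getLast? = some last →
    coproduct_iterator (head, tail)
      = (pvRel tail).map (fun r => head ++ r.map (fun x => last + x)) := by
  intro n
  induction n using Nat.strong_induction_on with
  | _ n IH =>
    intro tail hlen hne head last hl
    obtain ⟨t0, rest, rfl⟩ := List.exists_cons_of_ne_nil hne
    by_cases h1 : (t0 :: rest).length = 1
    · rw [coproduct_iterator.eq_def, pvRel.eq_def]
      simp [h1]
    · -- length ≥ 2
      have hn2 : 2 ≤ (t0 :: rest).length := by
        simp only [List.length_cons] at h1 ⊢; omega
      have hget : PySem.List.pyGet? head (-1) = some last := by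
        rw [PySem.List.pyGet?_neg_one]; exact hl
      rw [coproduct_iterator.eq_def, pvRel.eq_def]
      simp only [h1, if_false, hget]
      -- reduce both attach forms
      rw [List.foldl_attach (l := PySem.List.pyRange 3 (PySem.List.len (t0 :: rest)))
            (b := ([] : List (List Int)))
            (f := fun acc s =>
              if PySem.List.pyGetD (t0 :: rest) s 0 ≠ t0 then
                acc ++ coproduct_iterator
                  (head ++ [last + s], PySem.List.slice (t0 :: rest) (some s))
              else acc),
          pv_flatMap_attach _
            (fun s =>
              (pvRel (PySem.List.slice (t0 :: rest) (some s))).map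
                (fun r => s :: r.map (fun x => s + x)))]
      rw [pv_foldl_if_append (fun s => PySem.List.pyGetD (t0 :: rest) s 0 ≠ t0)
            (fun s => coproduct_iterator (head ++ [last + s], PySem.List.slice (t0 :: rest) (some s)))]
      rw [List.map_flatMap]
      simp only [List.map_map, List.nil_append]
      rw [List.flatMap_cons]
      -- pointwise equality of the two flatMaps over 1 :: filtered steps
      have key : ∀ s : Int, 1 ≤ s → s < ((t0 :: rest).length : Int) →
          coproduct_iterator (head ++ [last + s], PySem.List.slice (t0 :: rest) (some s))
            = (pvRel (PySem.List.slice (t0 :: rest) (some s))).map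
                ((fun r => head ++ r.map (fun x => last + x)) ∘
                  (fun r => s :: r.map (fun x => s + x))) := by
        intro s hs1 hsn
        have h0s : (0 : Int) ≤ s := by omega
        rw [PySem.List.slice_from _ (a := s) h0s]
        have hdlen : ((t0 :: rest).drop s.toNat).length = (t0 :: rest).length - s.toNat := by
          simp
        have hdne : (t0 :: rest).drop s.toNat ≠ [] := by
          intro h
          have := congrArg List.length h
          simp only [hdlen, List.length_nil] at this
          simp only [List.length_cons] at hsn this
          omega
        have hlt : ((t0 :: rest).drop s.toNat).length < n := by
          rw [hdlen, ← hlen]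
          simp only [List.length_cons] at hsn ⊢
          omega
        have hlast : (head ++ [last + s]).getLast? = some (last + s) := List.getLast?_concat
        rw [IH _ hlt _ rfl hdne _ _ hlast]
        apply List.map_congr_left
        intro r _
        simp only [Function.comp_apply, List.map_cons, List.map_map, List.append_assoc,
          List.cons_append, List.nil_append]
        have : List.map (fun x => last + s + x) r
            = List.map ((fun x => last + x) ∘ fun x => s + x) r :=
          List.map_congr_left (fun x _ => by simp only [Function.comp_apply]; ring)
        rw [this]
      congr 1
      · exact key 1 (by norm_num) (by simp only [List.length_cons] at hn2 ⊢; push_cast; omega)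
      · rw [List.flatMap_def, List.flatMap_def]
        congr 1
        apply List.map_congr_left
        intro s hs
        have hmem := PySem.List.mem_pyRange_one.mp (List.mem_of_mem_filter hs)
        simp only [PySem.List.len_eq, List.length_cons] at hmem
        exact key s (by omega) (by simp only [List.length_cons] at hn2 ⊢; push_cast; omega)

-- ===== VERDICT (by name: the statement is the Claim_ definition above) =====
theorem coproduct_iterator_spec : Claim_equal_coproduct_iterator := by
  intro paire _ hpre
  obtain ⟨head, tail⟩ := paire
  obtain ⟨hne, hh⟩ := hpre
  unfold Spec_coproduct_iterator coproduct_iterator_alt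
  by_cases h1 : tail.length = 1
  · rw [coproduct_iterator.eq_def]
    obtain ⟨t0, rest, rfl⟩ := List.exists_cons_of_ne_nil hne
    simp [h1]
  · simp only [h1, if_false]
    have hhead : head ≠ [] := by
      rcases hh with h | h
      · exact absurd h h1
      · exact h
    have hl : head.getLast? = some (head.getLast hhead) := List.getLast?_eq_some_getLast hhead
    rw [PySem.List.pyGet?_neg_one, hl]
    exact pv_main tail.length tail rfl hne head _ hl
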